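-- pv_equiv track=rewrite | github.com/floyduk/Advent-Of-Code-2024 | day12/d12p2.py | perimeter_of
-- ===== SOURCE A (Python) =====
-- directions = [(1,0), (0,1), (-1, 0), (0,-1)]
--
-- def perimeter_of(region):
--     perimeter = 0
--     for space in region:
--         sides = 4               # obvs
--         (x, y) = space
--         # Look in all 4 directions. Any directions that are also in the region remove one side from this location
--         for d in directions:
--             if (x+d[0], y+d[1]) in region:
--                 sides -= 1
--         perimeter += sides
--     return(perimeter)
-- ===== SOURCE B (Python) =====
-- def perimeter_of(region):
--     shared = 0
--     for (x, y) in region: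
--         if (x + 1, y) in region:
--             shared += 1
--         if (x, y + 1) in region:
--             shared += 1
--     return 4 * len(region) - 2 * shared
-- ===== Notes on version B (the rewrite author's own statement) =====
-- stated objective: alternative
-- what changed: B replaces A's per-cell four-direction countdown of exposed sides by the closed form 4*len(region) minus twice the number of shared internal edges, counting each shared edge once by probing only the right and down neighbours; Pre_ only states that the list encoding the Python set has no duplicate cells, which is automatic for a set.
import Mathlib
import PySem

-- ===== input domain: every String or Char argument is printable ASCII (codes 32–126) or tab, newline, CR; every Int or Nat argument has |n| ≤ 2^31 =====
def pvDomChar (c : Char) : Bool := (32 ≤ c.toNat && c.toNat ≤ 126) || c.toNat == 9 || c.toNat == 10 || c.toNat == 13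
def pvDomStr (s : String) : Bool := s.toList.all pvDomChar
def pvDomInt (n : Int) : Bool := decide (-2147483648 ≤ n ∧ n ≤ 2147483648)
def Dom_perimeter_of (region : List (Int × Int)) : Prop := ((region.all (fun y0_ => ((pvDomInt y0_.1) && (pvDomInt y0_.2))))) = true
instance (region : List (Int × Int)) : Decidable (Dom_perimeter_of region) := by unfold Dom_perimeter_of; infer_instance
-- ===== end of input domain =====

-- B computes the same perimeter by the closed form 4*|region| - 2*(shared internal edges),
-- probing only right and down neighbours, instead of A's per-cell four-direction countdown.

-- ===== PORT A =====
def pvDirections : List (Int × Int) := [(1, 0), (0, 1), (-1, 0), (0, -1)]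

def perimeter_of (region : List (Int × Int)) : Int :=
  region.foldl (fun perimeter space =>
    perimeter +
      pvDirections.foldl (fun sides d =>
        if (space.1 + d.1, space.2 + d.2) ∈ region then sides - 1 else sides) 4) 0

-- ===== PORT B =====
def perimeter_of_alt (region : List (Int × Int)) : Int :=
  let shared := region.foldl (fun shared p =>
    let shared := if (p.1 + 1, p.2) ∈ region then shared + 1 else shared
    if (p.1, p.2 + 1) ∈ region then shared + 1 else shared) 0
  4 * (region.length : Int) - 2 * shared

-- ===== PRECONDITION & SPEC =====
-- The Python parameter is a set of cells; its List encoding is duplicate-free, which is all Pre_ states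
-- (it excludes no Python input; the proof needs it because duplicate entries would change both counts).
def Pre_perimeter_of (region : List (Int × Int)) : Prop := region.Nodup
instance (region : List (Int × Int)) : Decidable (Pre_perimeter_of region) := by unfold Pre_perimeter_of; infer_instance

def pvWitness_perimeter_of : (List (Int × Int)) := [(0, 0), (1, 0), (1, 1)]

def Spec_perimeter_of (region : List (Int × Int)) (out : Int) : Prop := out = perimeter_of_alt region
instance (region : List (Int × Int)) (out : Int) : Decidable (Spec_perimeter_of region out) := by unfold Spec_perimeter_of; infer_instance

-- ===== CLAIM (what is proved, stated in full; the proofs are below) =====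
def Claim_equal_perimeter_of : Prop := ∀ (region : List (Int × Int)), Dom_perimeter_of region → Pre_perimeter_of region → Spec_perimeter_of region (perimeter_of region)

-- ===== LEMMAS AND PROOFS =====

-- indicator: 1 when the v-neighbour of a lies in l
def pvI (l : List (Int × Int)) (v : Int × Int) (a : Int × Int) : Int :=
  if (a.1 + v.1, a.2 + v.2) ∈ l then 1 else 0

-- A's inner four-direction countdown, per cell
theorem pvA_cell (l : List (Int × Int)) (a : Int × Int) :
    pvDirections.foldl (fun sides d =>
        if (a.1 + d.1, a.2 + d.2) ∈ l then sides - 1 else sides) 4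
      = 4 - (pvI l (1, 0) a + pvI l (0, 1) a + pvI l (-1, 0) a + pvI l (0, -1) a) := by
  simp only [pvDirections, List.foldl, pvI]
  split_ifs <;> ring

-- B's loop body, per cell
theorem pvB_cell (l : List (Int × Int)) :
    (fun shared (p : Int × Int) =>
        let shared := if (p.1 + 1, p.2) ∈ l then shared + 1 else shared
        if (p.1, p.2 + 1) ∈ l then shared + 1 else shared)
      = fun shared p => shared + (pvI l (1, 0) p + pvI l (0, 1) p) := by
  funext s p
  dsimp only [pvI]
  simp only [add_zero]
  split_ifs <;> ring

-- a 0/1 indicator sum is a countP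
theorem pvSum_I (l m : List (Int × Int)) (v : Int × Int) :
    (m.map (pvI l v)).sum = (m.countP (fun a => decide ((a.1 + v.1, a.2 + v.2) ∈ l)) : Int) := by
  rw [← PySem.List.sum_map_ite_one_zero (fun a => decide ((a.1 + v.1, a.2 + v.2) ∈ l)) m]
  congr 1
  apply List.map_congr_left
  intro a _
  simp [pvI]

-- KEY: on a duplicate-free list, the number of cells whose v-neighbour is present equals the
-- number of cells whose (-v)-neighbour is present (shift by v is a bijection between the two sets).
theorem pvCount_flip (l : List (Int × Int)) (h : l.Nodup) (v : Int × Int) :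
    l.countP (fun a => decide ((a.1 + v.1, a.2 + v.2) ∈ l))
      = l.countP (fun a => decide ((a.1 - v.1, a.2 - v.2) ∈ l)) := by
  rw [List.countP_eq_length_filter, List.countP_eq_length_filter]
  rw [← List.toFinset_card_of_nodup (h.filter _), ← List.toFinset_card_of_nodup (h.filter _)]
  rw [List.toFinset_filter, List.toFinset_filter]
  refine Finset.card_nbij' (fun a => (a.1 + v.1, a.2 + v.2)) (fun b => (b.1 - v.1, b.2 - v.2))
    ?_ ?_ ?_ ?_
  · intro a ha
    simp only [Finset.coe_filter, Set.mem_setOf_eq, List.mem_toFinset, decide_eq_true_eq] at ha ⊢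
    exact ⟨ha.2, by simpa using ha.1⟩
  · intro b hb
    simp only [Finset.coe_filter, Set.mem_setOf_eq, List.mem_toFinset, decide_eq_true_eq] at hb ⊢
    refine ⟨hb.2, ?_⟩
    have hbe : (b.1 - v.1 + v.1, b.2 - v.2 + v.2) = b := by
      obtain ⟨b1, b2⟩ := b
      simp
    rw [hbe]; exact hb.1
  · intro a _
    obtain ⟨a1, a2⟩ := a
    simp
  · intro b _
    obtain ⟨b1, b2⟩ := b
    simp

theorem pvSum_I_flip (l : List (Int × Int)) (h : l.Nodup) (v : Int × Int) :
    (l.map (pvI l v)).sum = (l.map (pvI l (-v.1, -v.2))).sum := by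
  rw [pvSum_I, pvSum_I, pvCount_flip l h v]
  congr 1

-- sum of (4 - g a) over l
theorem pvSum_sub_const (l : List (Int × Int)) (g : Int × Int → Int) :
    (l.map (fun a => (4 : Int) - g a)).sum = 4 * l.length - (l.map g).sum := by
  induction l with
  | nil => simp
  | cons x xs ih => simp [ih]; ring

-- ===== VERDICT (by name: the statement is the Claim_ definition above) =====
theorem perimeter_of_spec : Claim_equal_perimeter_of := by
  intro region _ hnd
  unfold Spec_perimeter_of perimeter_of perimeter_of_alt
  -- rewrite both folds as sums over the region
  have hA : (region.foldl (fun perimeter space =>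
      perimeter + pvDirections.foldl (fun sides d =>
        if (space.1 + d.1, space.2 + d.2) ∈ region then sides - 1 else sides) 4) 0)
      = (region.map (fun a => (4 : Int) -
          (pvI region (1, 0) a + pvI region (0, 1) a + pvI region (-1, 0) a + pvI region (0, -1) a))).sum := by
    rw [PySem.List.foldl_add region (fun space => pvDirections.foldl (fun sides d =>
        if (space.1 + d.1, space.2 + d.2) ∈ region then sides - 1 else sides) 4) 0]
    simp only [pvA_cell, zero_add]
  have hB : (region.foldl (fun shared (p : Int × Int) =>
      let shared := if (p.1 + 1, p.2) ∈ region then shared + 1 else shared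
      if (p.1, p.2 + 1) ∈ region then shared + 1 else shared) 0)
      = (region.map (fun p => pvI region (1, 0) p + pvI region (0, 1) p)).sum := by
    rw [pvB_cell region]
    rw [PySem.List.foldl_add region (fun p => pvI region (1, 0) p + pvI region (0, 1) p) 0]
    simp
  simp only [hA, hB]
  rw [pvSum_sub_const]
  have h1 : (region.map (pvI region (-1, 0))).sum = (region.map (pvI region (1, 0))).sum := by
    have := pvSum_I_flip region hnd (1, 0); simpa using this.symm
  have h2 : (region.map (pvI region (0, -1))).sum = (region.map (pvI region (0, 1))).sum := by
    have := pvSum_I_flip region hnd (0, 1); simpa using this.symm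
  rw [show (fun a => pvI region (1, 0) a + pvI region (0, 1) a + pvI region (-1, 0) a + pvI region (0, -1) a)
        = (fun a => (pvI region (1, 0) a + pvI region (0, 1) a) + (pvI region (-1, 0) a + pvI region (0, -1) a)) from by
      funext a; ring]
  rw [PySem.List.sum_map_add_int, PySem.List.sum_map_add_int, PySem.List.sum_map_add_int, h1, h2]
  ring
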